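-- pv_equiv track=rewrite | github.com/TauTheLepton/WSI-21Z | cw6/Maze.py | makeMaze
-- ===== SOURCE A (Python) =====
-- def makeMaze(maze_str):
--     maze = [[]]
--     idx = 0
--     for sign in maze_str:
--         if sign == '\n':
--             idx += 1
--             maze.append([])
--         else:
--             maze[idx].append(sign)
--     return maze
-- ===== SOURCE B (Python) =====
-- def makeMaze(maze_str):
--     return [list(line) for line in maze_str.split('\n')]
-- ===== Notes on version B (the rewrite author's own statement) =====
-- stated objective: idiomatic
-- what changed: Replaces the char-by-char loop with an explicit line index and list mutation by splitting the string on newlines first and then converting each line substring to a character list.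
import Mathlib
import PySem

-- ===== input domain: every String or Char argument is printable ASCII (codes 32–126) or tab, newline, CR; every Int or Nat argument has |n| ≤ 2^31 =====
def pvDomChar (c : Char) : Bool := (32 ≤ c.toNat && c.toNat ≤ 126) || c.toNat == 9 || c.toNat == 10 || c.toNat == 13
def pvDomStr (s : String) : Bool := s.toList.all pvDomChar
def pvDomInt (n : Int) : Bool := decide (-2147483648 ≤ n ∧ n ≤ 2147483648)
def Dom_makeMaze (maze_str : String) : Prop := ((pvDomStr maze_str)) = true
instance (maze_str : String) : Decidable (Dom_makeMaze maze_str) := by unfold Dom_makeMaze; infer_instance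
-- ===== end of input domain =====

-- B replaces A's char-by-char loop (explicit line index, mutated nested list) with
-- split-on-newline followed by a per-line character-list conversion (idiomatic).

-- ===== PORT A =====
-- A's loop: state is (maze, idx); '\n' appends a fresh line and bumps idx,
-- any other char is appended to maze[idx].
def makeMazeStep (st : List (List String) × Nat) (sign : Char) : List (List String) × Nat :=
  if sign = '\n' then (st.1 ++ [[]], st.2 + 1)
  else (st.1.set st.2 (st.1.getD st.2 [] ++ [sign.toString]), st.2)

def makeMaze (maze_str : String) : List (List String) :=
  (maze_str.toList.foldl makeMazeStep ([[]], 0)).1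

-- ===== PORT B =====
-- hand port of str.split('\n') on the character list (exact: single-char separator)
def splitNL : List Char → List (List Char)
  | [] => [[]]
  | c :: rest =>
    if c = '\n' then [] :: splitNL rest
    else
      match splitNL rest with
      | l :: ls => (c :: l) :: ls
      | [] => [[c]]

def makeMaze_alt (maze_str : String) : List (List String) :=
  (splitNL maze_str.toList).map (fun line => line.map Char.toString)

-- ===== PRECONDITION & SPEC =====
def Spec_makeMaze (maze_str : String) (out : List (List String)) : Prop := out = makeMaze_alt maze_str
instance (maze_str : String) (out : List (List String)) : Decidable (Spec_makeMaze maze_str out) := by unfold Spec_makeMaze; infer_instance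

-- ===== CLAIM (what is proved, stated in full; the proofs are below) =====
def Claim_equal_makeMaze : Prop := ∀ (maze_str : String), Dom_makeMaze maze_str → Spec_makeMaze maze_str (makeMaze maze_str)

-- ===== LEMMAS AND PROOFS =====

def consFirst (x : List String) : List (List String) → List (List String)
  | [] => [x]
  | l :: ls => (x ++ l) :: ls

lemma splitNL_ne_nil (cs : List Char) : splitNL cs ≠ [] := by
  cases cs with
  | nil => simp [splitNL]
  | cons c rest =>
    simp only [splitNL]
    split
    · simp
    · cases h : splitNL rest <;> simp

def mazeOf (cs : List Char) : List (List String) :=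
  (splitNL cs).map (fun line => line.map Char.toString)

lemma mazeOf_ne_nil (cs : List Char) : mazeOf cs ≠ [] := by
  simp [mazeOf, splitNL_ne_nil]

lemma consFirst_nil (ls : List (List String)) (h : ls ≠ []) : consFirst [] ls = ls := by
  cases ls with
  | nil => exact absurd rfl h
  | cons l ls => simp [consFirst]

lemma foldl_makeMazeStep (cs : List Char) :
    ∀ (acc : List (List String)) (l : List String),
      (cs.foldl makeMazeStep (acc ++ [l], acc.length)).1 = acc ++ consFirst l (mazeOf cs) := by
  induction cs with
  | nil =>
    intro acc l
    simp [mazeOf, splitNL, consFirst]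
  | cons c rest ih =>
    intro acc l
    by_cases hc : c = '\n'
    · subst hc
      have hstep : makeMazeStep (acc ++ [l], acc.length) '\n' = ((acc ++ [l]) ++ [[]], (acc ++ [l]).length) := by
        simp [makeMazeStep]
      rw [List.foldl_cons, hstep, ih (acc ++ [l]) []]
      have hm : mazeOf ('\n' :: rest) = [] :: mazeOf rest := by
        simp [mazeOf, splitNL]
      rw [hm, consFirst_nil _ (mazeOf_ne_nil rest)]
      simp [consFirst]
    · have hget : (acc ++ [l]).getD acc.length [] = l := by
        simp [List.getD]
      have hset : (acc ++ [l]).set acc.length (l ++ [c.toString]) = acc ++ [l ++ [c.toString]] := by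
        rw [List.set_append_right _ _ (le_refl _)]
        simp
      have hstep : makeMazeStep (acc ++ [l], acc.length) c = (acc ++ [l ++ [c.toString]], acc.length) := by
        simp only [makeMazeStep, if_neg hc]
        rw [hget, hset]
      rw [List.foldl_cons, hstep, ih acc (l ++ [c.toString])]
      -- mazeOf (c :: rest) has shape (c.toString :: h) :: t where mazeOf rest = h :: t
      obtain ⟨h0, t0, hsplit⟩ : ∃ h0 t0, splitNL rest = h0 :: t0 := by
        cases hx : splitNL rest with
        | nil => exact absurd hx (splitNL_ne_nil rest)
        | cons a b => exact ⟨a, b, rfl⟩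
      have hm : mazeOf (c :: rest) = (c.toString :: h0.map Char.toString) :: t0.map (fun line => line.map Char.toString) := by
        simp [mazeOf, splitNL, if_neg hc, hsplit]
      have hm' : mazeOf rest = (h0.map Char.toString) :: t0.map (fun line => line.map Char.toString) := by
        simp [mazeOf, hsplit]
      rw [hm, hm']
      simp [consFirst]

-- ===== VERDICT (by name: the statement is the Claim_ definition above) =====
theorem makeMaze_spec : Claim_equal_makeMaze := by
  intro s _
  unfold Spec_makeMaze makeMaze
  have h := foldl_makeMazeStep s.toList [] []
  rw [consFirst_nil _ (mazeOf_ne_nil s.toList)] at h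
  simpa [makeMaze_alt, mazeOf] using h
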